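-- pv_equiv track=rewrite | github.com/OTOYO1020/ChatDev_Intermediate | WareHouse/C_287__20250512033912/main.py | dfs
-- ===== SOURCE A (Python) =====
-- def dfs(vertex: int, graph: dict, visited: set, parent: int) -> bool:
--     '''
--     Depth-first search to check connectivity and cycles.
--     '''
--     visited.add(vertex)
--     for neighbor in graph.get(vertex, []):
--         if neighbor not in visited:
--             if not dfs(neighbor, graph, visited, vertex):
--                 return False
--         elif neighbor != parent:  # A cycle is detected
--             return False
--     return True
-- ===== SOURCE B (Python) =====
-- def dfs(vertex: int, graph: dict, visited: set, parent: int) -> bool: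
--     '''
--     Iterative depth-first search with an explicit stack of frames
--     (vertex, neighbor-iterator, parent); same visited mutation order.
--     '''
--     visited.add(vertex)
--     stack = [(vertex, iter(graph.get(vertex, [])), parent)]
--     while stack:
--         v, it, par = stack[-1]
--         advanced = False
--         for neighbor in it:
--             if neighbor not in visited:
--                 visited.add(neighbor)
--                 stack.append((neighbor, iter(graph.get(neighbor, [])), v))
--                 advanced = True
--                 break
--             elif neighbor != par:
--                 return False
--         if not advanced:
--             stack.pop()
--     return True
-- ===== Notes on version B (the rewrite author's own statement) =====
-- stated objective: alternative
-- what changed: Replaces A's recursive DFS with an iterative DFS over an explicit stack of (vertex, neighbor-iterator, parent) frames that mirrors the recursion's traversal order and visited mutation.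
import Mathlib
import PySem

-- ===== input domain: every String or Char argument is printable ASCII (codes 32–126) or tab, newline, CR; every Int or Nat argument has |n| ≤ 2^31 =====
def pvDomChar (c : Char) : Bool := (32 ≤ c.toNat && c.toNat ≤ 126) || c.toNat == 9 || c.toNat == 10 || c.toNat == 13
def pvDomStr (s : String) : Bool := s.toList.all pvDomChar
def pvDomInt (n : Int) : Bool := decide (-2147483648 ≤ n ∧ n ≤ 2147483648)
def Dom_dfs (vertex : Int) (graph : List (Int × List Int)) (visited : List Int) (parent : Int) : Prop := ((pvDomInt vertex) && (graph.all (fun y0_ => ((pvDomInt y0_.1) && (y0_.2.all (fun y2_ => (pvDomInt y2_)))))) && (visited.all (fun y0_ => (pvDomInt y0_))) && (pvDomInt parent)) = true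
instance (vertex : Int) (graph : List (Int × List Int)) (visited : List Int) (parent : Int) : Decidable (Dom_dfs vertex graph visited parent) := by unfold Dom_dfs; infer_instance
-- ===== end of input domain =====

-- B replaces A's recursion by an iterative DFS over an explicit stack of frames (alternative
-- decomposition, same cost); both Pythons mutate `visited` identically, and the ports thread the
-- visited set explicitly; the proved equivalence is about the returned Bool.

-- ===== PORT A =====
-- shared lookup helper: graph.get(v, [])
def adj (g : List (Int × List Int)) (v : Int) : List Int :=
  PySem.Dict.getD (PySem.Dict.mk g) v []

-- fuel: recursion depth is bounded by (total number of neighbor entries) + 1, since every nested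
-- call is made on a previously unvisited neighbor, which it immediately adds to `visited`; the
-- fuel guard only makes the transliteration total and is never exhausted on reachable states.
def sumAdj (g : List (Int × List Int)) : Nat := (g.map (fun pr => pr.2.length)).sum

mutual
-- one recursive call of Python's dfs: add `v` to visited, then run the for-loop
def dfsA (g : List (Int × List Int)) (fuel : Nat) (v : Int) (vis : PySem.Set Int) (p : Int) :
    Bool × PySem.Set Int :=
  match fuel with
  | 0 => (true, PySem.Set.add vis v)
  | f + 1 => loopA g f (adj g v) (PySem.Set.add vis v) v p
  termination_by (fuel, 0)

-- the `for neighbor in graph.get(vertex, [])` loop, threading the mutated visited set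
def loopA (g : List (Int × List Int)) (f : Nat) (ns : List Int) (vis : PySem.Set Int)
    (v p : Int) : Bool × PySem.Set Int :=
  match ns with
  | [] => (true, vis)
  | n :: ns' =>
    if PySem.Set.contains vis n = false then
      match dfsA g f n vis v with
      | (false, vis') => (false, vis')
      | (true, vis') => loopA g f ns' vis' v p
    else if n ≠ p then (false, vis)
    else loopA g f ns' vis v p
  termination_by (f, ns.length + 1)
end

def dfs (vertex : Int) (graph : List (Int × List Int)) (visited : List Int) (parent : Int) : Bool :=
  (dfsA graph (sumAdj graph + 1) vertex visited parent).1

-- ===== PORT B =====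
-- largest adjacency-list length; used only by runB's termination measure
def maxAdj (g : List (Int × List Int)) : Nat :=
  g.foldr (fun pr m => max pr.2.length m) 0

-- cited by runB's decreasing_by
theorem adjLen_le (g : List (Int × List Int)) (n : Int) : (adj g n).length ≤ maxAdj g := by
  induction g with
  | nil => simp [adj, maxAdj, PySem.Dict.getD, PySem.Dict.get?]
  | cons hd tl ih =>
    obtain ⟨k, vs⟩ := hd
    by_cases h : (k == n) = true
    · simp [adj, maxAdj, PySem.Dict.getD, PySem.Dict.get?_mk_cons, h]
    · simp only [adj, maxAdj, PySem.Dict.getD, PySem.Dict.get?_mk_cons, h, if_false,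
        Bool.false_eq_true, List.foldr_cons] at *
      omega

-- the while-loop over the explicit stack of frames (vertex, remaining neighbors, parent);
-- each frame also carries the fuel its children get (the same depth bound as port A's fuel,
-- added only for termination)
def runB (g : List (Int × List Int)) (st : List (Int × List Int × Int × Nat))
    (vis : PySem.Set Int) : Bool × PySem.Set Int :=
  match st with
  | [] => (true, vis)
  | (v, ns, p, f) :: rest =>
    match ns with
    | [] => runB g rest vis
    | n :: ns' =>
      if PySem.Set.contains vis n = false then
        match f with
        | 0 => runB g ((v, ns', p, 0) :: rest) (PySem.Set.add vis n)
        | f' + 1 =>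
          runB g ((n, adj g n, v, f') :: (v, ns', p, f' + 1) :: rest) (PySem.Set.add vis n)
      else if n ≠ p then (false, vis)
      else runB g ((v, ns', p, f) :: rest) vis
termination_by (st.map (fun fr => (maxAdj g + 2) ^ fr.2.2.2 * (fr.2.1.length + 1))).sum
decreasing_by
  all_goals simp only [List.map_cons, List.sum_cons, List.length_cons, Nat.succ_eq_add_one]
  · have hpos : 0 < (maxAdj g + 2) ^ f := pow_pos (by omega) f
    nlinarith [hpos]
  · have hpos : 0 < (maxAdj g + 2) ^ (0 : Nat) := pow_pos (by omega) 0
    nlinarith [hpos]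
  · have hpos : 0 < (maxAdj g + 2) ^ f' := pow_pos (by omega) f'
    have ha := adjLen_le g n
    have h1 : (maxAdj g + 2) ^ f' * ((adj g n).length + 1) < (maxAdj g + 2) ^ f' * (maxAdj g + 2) := by
      nlinarith [hpos, ha]
    have h2 : (maxAdj g + 2) ^ f' * (maxAdj g + 2) = (maxAdj g + 2) ^ (f' + 1) :=
      (pow_succ (maxAdj g + 2) f').symm
    have h3 : (maxAdj g + 2) ^ (f' + 1) * (ns'.length + 1 + 1)
        = (maxAdj g + 2) ^ (f' + 1) * (ns'.length + 1) + (maxAdj g + 2) ^ (f' + 1) := by ring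
    omega
  · have hpos : 0 < (maxAdj g + 2) ^ f := pow_pos (by omega) f
    nlinarith [hpos]

def dfs_alt (vertex : Int) (graph : List (Int × List Int)) (visited : List Int) (parent : Int) : Bool :=
  (runB graph [(vertex, adj graph vertex, parent, sumAdj graph)] (PySem.Set.add visited vertex)).1

-- ===== PRECONDITION & SPEC =====
def Spec_dfs (vertex : Int) (graph : List (Int × List Int)) (visited : List Int) (parent : Int) (out : Bool) : Prop := out = dfs_alt vertex graph visited parent
instance (vertex : Int) (graph : List (Int × List Int)) (visited : List Int) (parent : Int) (out : Bool) : Decidable (Spec_dfs vertex graph visited parent out) := by unfold Spec_dfs; infer_instance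

-- ===== CLAIM (what is proved, stated in full; the proofs are below) =====
def Claim_equal_dfs : Prop := ∀ (vertex : Int) (graph : List (Int × List Int)) (visited : List Int) (parent : Int), Dom_dfs vertex graph visited parent → Spec_dfs vertex graph visited parent (dfs vertex graph visited parent)

-- ===== LEMMAS AND PROOFS =====

-- simulation: running the machine with a top frame (v, ns, p, f) is running A's loop on it, then
-- continuing with the rest of the stack on the visited set the loop produced
theorem runB_eq_loopA (g : List (Int × List Int)) (f : Nat) (ns : List Int)
    (v p : Int) (rest : List (Int × List Int × Int × Nat)) (vis : PySem.Set Int) :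
    runB g ((v, ns, p, f) :: rest) vis =
      (match loopA g f ns vis v p with
       | (false, vis') => (false, vis')
       | (true, vis') => runB g rest vis') := by
  cases ns with
  | nil => rw [runB.eq_def, loopA.eq_def]
  | cons n ns' =>
    rw [runB.eq_def, loopA.eq_def]
    by_cases hc : PySem.Set.contains vis n = false
    · simp only [hc, if_true]
      cases f with
      | zero =>
        show runB g ((v, ns', p, 0) :: rest) (PySem.Set.add vis n) = _
        rw [dfsA]
        simpa using runB_eq_loopA g 0 ns' v p rest (PySem.Set.add vis n)
      | succ f' =>
        show runB g ((n, adj g n, v, f') :: (v, ns', p, f' + 1) :: rest)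
            (PySem.Set.add vis n) = _
        rw [dfsA]
        rw [runB_eq_loopA g f' (adj g n) n v ((v, ns', p, f' + 1) :: rest) (PySem.Set.add vis n)]
        rcases h1 : loopA g f' (adj g n) (PySem.Set.add vis n) n v with ⟨b, w⟩
        cases b
        · rfl
        · simpa using runB_eq_loopA g (f' + 1) ns' v p rest w
    · simp only [hc]
      by_cases hp : n = p
      · simp only [hp, ne_eq, not_true_eq_false, if_false]
        exact runB_eq_loopA g f ns' v p rest vis
      · simp [hp]
termination_by (f, ns.length)
decreasing_by
  all_goals simp_wf
  all_goals try subst_vars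
  all_goals first
    | exact Prod.Lex.left _ _ (by omega)
    | exact Prod.Lex.right _ (by omega)

-- ===== VERDICT (by name: the statement is the Claim_ definition above) =====
theorem dfs_spec : Claim_equal_dfs := by
  intro vertex graph visited parent _
  unfold Spec_dfs dfs dfs_alt
  rw [dfsA.eq_def]
  show (loopA graph (sumAdj graph) (adj graph vertex) (PySem.Set.add visited vertex)
      vertex parent).1 = _
  rw [runB_eq_loopA graph (sumAdj graph) (adj graph vertex) vertex parent []
      (PySem.Set.add visited vertex)]
  rcases loopA graph (sumAdj graph) (adj graph vertex) (PySem.Set.add visited vertex)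
      vertex parent with ⟨b, w⟩
  cases b
  · rfl
  · show true = (runB graph [] w).1
    rw [runB.eq_def]
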